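-- pv_equiv track=rewrite | github.com/thu-hoai/Intek-project | Fundamental-Data-Structure-and-Algorithms/nonogram_solution_checker/check_nonogram.py | check_solution_row
-- ===== SOURCE A (Python) =====
-- def check_solution_row(array):
--     """
--     Return a tuple of all count rows of solution
--
--     Parameter: an array as below instance
--     -------------
--         tuple
--         solution1_true = (
--         (0, 1, 0, 1, 0),
--         (1, 1, 1, 1, 1),
--         (1, 1, 1, 1, 1),
--         (0, 1, 1, 1, 0),
--         (0, 0, 1, 0, 0)
--         )
--
--     Return:
--     --------------
--         tuple
--         ((1, 1), (5,), (5,), (3,), (1,))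
--     """
--
--     # Initialize a tuple o store the count of "1" of all rows
--     all_row_list = ()
--     # Check each value in given solution
--     for i in range(len(array)):
--         tmp_count = 0
--         # Initialize a tuple o store the count of "1" of current rows
--         each_row_count = ()
--         for value in array[i]:
--             if value == 1:
--                 tmp_count += 1
--             else:
--                 if tmp_count != 0:
--                     each_row_count += (tmp_count,)
--                 tmp_count = 0 # Restart tmp_count for every catching "0"
--         if tmp_count != 0:
--             each_row_count += (tmp_count,)
--         all_row_list += (each_row_count,)
--         # Restart all temporary value every other rows
--         each_row_count = ()
--         tmp_count = 0
--     return all_row_list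
-- ===== SOURCE B (Python) =====
-- def check_solution_row(array):
--     def lengths(row):
--         # positions of separators (anything that is not 1), with sentinels at -1 and len(row);
--         # each maximal run of 1s is exactly the gap between two consecutive separators
--         seps = [-1] + [i for i, v in enumerate(row) if v != 1] + [len(row)]
--         return tuple(b - a - 1 for a, b in zip(seps, seps[1:]) if b - a > 1)
--     return tuple(lengths(row) for row in array)
-- ===== Notes on version B (the rewrite author's own statement) =====
-- stated objective: alternative
-- what changed: Instead of scanning with a running counter per row, B collects the positions of all non-1 separators (with sentinels -1 and len(row)) and derives each run length as the gap b-a-1 between consecutive separator positions, keeping positive gaps.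
import Mathlib
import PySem

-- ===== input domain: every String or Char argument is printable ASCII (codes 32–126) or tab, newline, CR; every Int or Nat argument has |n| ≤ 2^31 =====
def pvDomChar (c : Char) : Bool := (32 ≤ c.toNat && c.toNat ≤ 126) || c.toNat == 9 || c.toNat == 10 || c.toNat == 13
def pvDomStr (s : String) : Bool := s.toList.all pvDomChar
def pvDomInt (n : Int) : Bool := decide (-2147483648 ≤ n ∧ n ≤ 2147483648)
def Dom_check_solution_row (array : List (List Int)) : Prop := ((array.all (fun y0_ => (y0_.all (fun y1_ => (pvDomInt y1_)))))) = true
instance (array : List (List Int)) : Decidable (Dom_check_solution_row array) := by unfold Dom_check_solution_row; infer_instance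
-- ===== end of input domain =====

-- B replaces A's hand-maintained counter-and-reset scan by index arithmetic on the
-- positions of non-1 separators: run lengths are gaps between consecutive separators (alternative; same cost).

-- ===== PORT A =====
-- one row of A: running count tmp_count, appended to the row tuple on each non-1 and at the end
def pvRowA (row : List Int) : List Int :=
  let s := row.foldl
    (fun (s : Int × List Int) value =>
      if value = 1 then (s.1 + 1, s.2)
      else (0, if s.1 ≠ 0 then s.2 ++ [s.1] else s.2))
    (0, [])
  if s.1 ≠ 0 then s.2 ++ [s.1] else s.2

def check_solution_row (array : List (List Int)) : List (List Int) :=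
  array.foldl (fun all_row_list row => all_row_list ++ [pvRowA row]) []

-- ===== PORT B =====
-- seps = [-1] + [i for i, v in enumerate(row) if v != 1] + [len(row)]
def pvSeps (row : List Int) : List Int :=
  [-1] ++ ((PySem.List.enumerate row).filter (fun p => p.2 ≠ 1)).map (·.1) ++ [(row.length : Int)]

-- tuple(b - a - 1 for a, b in zip(seps, seps[1:]) if b - a > 1)
def pvRowB (row : List Int) : List Int :=
  ((pvSeps row).zip (pvSeps row).tail).filterMap
    (fun p => if p.2 - p.1 > 1 then some (p.2 - p.1 - 1) else none)

def check_solution_row_alt (array : List (List Int)) : List (List Int) :=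
  array.map pvRowB

-- ===== PRECONDITION & SPEC =====
def Spec_check_solution_row (array : List (List Int)) (out : List (List Int)) : Prop := out = check_solution_row_alt array
instance (array : List (List Int)) (out : List (List Int)) : Decidable (Spec_check_solution_row array out) := by unfold Spec_check_solution_row; infer_instance

-- ===== CLAIM (what is proved, stated in full; the proofs are below) =====
def Claim_equal_check_solution_row : Prop := ∀ (array : List (List Int)), Dom_check_solution_row array → Spec_check_solution_row array (check_solution_row array)

-- ===== LEMMAS AND PROOFS =====

-- A's loop state, phrased as a function of the remaining row (tmp = current running count)
def pvG (tmp : Int) : List Int → List Int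
  | [] => if tmp ≠ 0 then [tmp] else []
  | v :: rest =>
    if v = 1 then pvG (tmp + 1) rest
    else (if tmp ≠ 0 then [tmp] else []) ++ pvG 0 rest

lemma pvFoldA_G (row : List Int) : ∀ (tmp : Int) (acc : List Int),
    (let s := row.foldl
        (fun (s : Int × List Int) value =>
          if value = 1 then (s.1 + 1, s.2)
          else (0, if s.1 ≠ 0 then s.2 ++ [s.1] else s.2))
        (tmp, acc)
     if s.1 ≠ 0 then s.2 ++ [s.1] else s.2) = acc ++ pvG tmp row := by
  induction row with
  | nil => intro tmp acc; by_cases h : tmp = 0 <;> simp [pvG, h]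
  | cons v rest ih =>
    intro tmp acc
    by_cases hv : v = 1
    · simpa [pvG, hv] using ih (tmp + 1) acc
    · by_cases ht : tmp = 0
      · simpa [pvG, hv, ht] using ih 0 acc
      · simpa [pvG, hv, ht] using ih 0 (acc ++ [tmp])

-- successive-gap view of B's zip-with-tail computation
def pvGapsOf : List Int → List Int
  | a :: b :: t => (if b - a > 1 then [b - a - 1] else []) ++ pvGapsOf (b :: t)
  | _ => []

lemma pvZip_gaps (l : List Int) :
    (l.zip l.tail).filterMap
      (fun p => if p.2 - p.1 > 1 then some (p.2 - p.1 - 1) else none) = pvGapsOf l := by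
  induction l with
  | nil => simp [pvGapsOf]
  | cons a t ih =>
    cases t with
    | nil => simp [pvGapsOf]
    | cons b t' =>
      rw [pvGapsOf]
      by_cases h : b - a > 1 <;> simp_all [List.zip_cons_cons]

-- the separator gaps of the suffix, with previous separator at prev and current index idx,
-- equal A's remaining computation with tmp = idx - prev - 1 ones pending
lemma pvGaps_G (row : List Int) : ∀ (prev idx : Int), prev < idx →
    pvGapsOf (prev :: (((PySem.List.enumerate row idx).filter (fun p => p.2 ≠ 1)).map (·.1)
        ++ [idx + row.length])) = pvG (idx - prev - 1) row := by
  induction row with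
  | nil =>
    intro prev idx h
    by_cases h1 : idx - prev > 1
    · have h2 : idx - prev - 1 ≠ 0 := by omega
      simp [PySem.List.enumerate_nil, pvGapsOf, pvG, h1, h2]
    · have h2 : idx - prev - 1 = 0 := by omega
      simp [PySem.List.enumerate_nil, pvGapsOf, pvG, h1, h2]
  | cons v rest ih =>
    intro prev idx h
    rw [PySem.List.enumerate_cons]
    by_cases hv : v = 1
    · have : (idx : Int) + (v :: rest).length = (idx + 1) + rest.length := by
        simp; omega
      rw [List.filter_cons_of_neg (by simp [hv]), this]
      have := ih prev (idx + 1) (by omega)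
      rw [pvG]
      simp only [hv, if_true]
      have harith : idx + 1 - prev - 1 = idx - prev - 1 + 1 := by omega
      rw [← harith, this]
    · have hlen : (idx : Int) + (v :: rest).length = (idx + 1) + rest.length := by
        simp; omega
      rw [List.filter_cons_of_pos (by simp [hv]), hlen]
      simp only [List.map_cons, List.cons_append]
      rw [pvGapsOf, ih idx (idx + 1) (by omega)]
      rw [pvG]; simp only [hv, if_false]
      have : idx + 1 - idx - 1 = (0 : Int) := by omega
      rw [this]
      by_cases h1 : idx - prev > 1
      · have : idx - prev - 1 ≠ 0 := by omega
        simp [h1, this]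
      · have : idx - prev - 1 = 0 := by omega
        simp [h1, this]

lemma pvRow_eq (row : List Int) : pvRowA row = pvRowB row := by
  have hA := pvFoldA_G row 0 []
  simp only [List.nil_append] at hA
  have hB : pvRowB row = pvG 0 row := by
    rw [pvRowB, pvZip_gaps, pvSeps]
    have := pvGaps_G row (-1) 0 (by omega)
    simpa using this
  rw [pvRowA, hA, hB]

lemma pvOuter (array : List (List Int)) : ∀ acc : List (List Int),
    array.foldl (fun all_row_list row => all_row_list ++ [pvRowA row]) acc
      = acc ++ array.map pvRowB := by
  induction array with
  | nil => intro acc; simp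
  | cons r rest ih =>
    intro acc
    rw [List.foldl_cons, ih, pvRow_eq]
    simp

-- ===== VERDICT (by name: the statement is the Claim_ definition above) =====
theorem check_solution_row_spec : Claim_equal_check_solution_row := by
  intro array _
  unfold Spec_check_solution_row check_solution_row check_solution_row_alt
  simpa using pvOuter array []
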